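-- pv_equiv track=rewrite | github.com/Anionex/banana-slides | backend/services/tts_video_service.py | _split_alignment_for_pages
-- ===== SOURCE A (Python) =====
-- from typing import List, Optional, Callable, Tuple
--
-- def _split_alignment_for_pages(
--     page_texts: List[str],
--     alignment: dict,
-- ) -> List[Tuple[int, int]]:
--     """
--     把整段 alignment 按各页文本的字符序列切分，返回每页对应的 alignment 索引区间
--     [al_start, al_end)（exclusive end）。
--
--     匹配策略与 _build_timed_subtitle_entries_from_alignment 一致：
--       - 跳过两侧 whitespace；
--       - 不区分大小写匹配；
--       - alignment 里多出的字符（规范化插入）跳过。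
--     """
--     chars = alignment.get('characters') or []
--     n = len(chars)
--     ranges: List[Tuple[int, int]] = []
--     al_idx = 0
--
--     for page_text in page_texts:
--         while al_idx < n and not chars[al_idx].strip():
--             al_idx += 1
--         start = al_idx
--
--         ti = 0
--         last_match = al_idx - 1
--         while al_idx < n and ti < len(page_text):
--             tch = page_text[ti]
--             ach = chars[al_idx]
--             if not tch.strip():
--                 ti += 1
--                 continue
--             if not ach.strip():
--                 al_idx += 1
--                 continue
--             if tch == ach or tch.lower() == ach.lower():
--                 last_match = al_idx
--                 al_idx += 1
--                 ti += 1
--             else: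
--                 al_idx += 1
--
--         end = last_match + 1 if last_match >= start else start
--         ranges.append((start, end))
--
--     return ranges
-- ===== SOURCE B (Python) =====
-- from typing import List, Tuple
--
-- def _split_alignment_for_pages(
--     page_texts: List[str],
--     alignment: dict,
-- ) -> List[Tuple[int, int]]:
--     chars = alignment.get('characters') or []
--     n = len(chars)
--
--     # Stage 1: flatten all pages into one lowered non-whitespace token stream,
--     # remembering only how many tokens each page contributed.
--     toks: List[str] = []
--     counts: List[int] = []
--     for pt in page_texts:
--         before = len(toks)
--         for ch in pt:
--             if ch.strip():
--                 toks.append(ch.lower())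
--         counts.append(len(toks) - before)
--
--     # Stage 2: one merge scan over the alignment chars, producing the global
--     # list of matched alignment indices (one per matched token, in order).
--     match_idx: List[int] = []
--     t = 0
--     for i, ac in enumerate(chars):
--         if t >= len(toks):
--             break
--         if not ac.strip():
--             continue
--         if ac.lower() == toks[t]:
--             match_idx.append(i)
--             t += 1
--     M = len(match_idx)
--
--     # Stage 3: next-non-whitespace table, filled back-to-front.
--     nxt = [n] * (n + 1)
--     for i in range(n - 1, -1, -1):
--         nxt[i] = i if chars[i].strip() else nxt[i + 1]
--
--     # Stage 4: arithmetic reconstruction of per-page ranges.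
--     ranges: List[Tuple[int, int]] = []
--     cur = 0
--     pos = 0
--     for cnt in counts:
--         start = nxt[cur]
--         lo, hi = pos, pos + cnt
--         pos = hi
--         mhi = min(hi, M)
--         if mhi > lo:
--             last = match_idx[mhi - 1]
--             ranges.append((start, last + 1))
--         else:
--             ranges.append((start, start))
--         if hi > M:
--             cur = n
--         elif mhi > lo:
--             cur = match_idx[mhi - 1] + 1
--         else:
--             cur = start
--     return ranges
-- ===== Notes on version B (the rewrite author's own statement) =====
-- stated objective: alternative
-- what changed: B replaces A's per-page two-pointer scan with a staged pipeline: it flattens all pages into one lowered non-whitespace token stream (keeping only per-page token counts), computes all matched alignment indices in a single merge scan over the alignment chars, precomputes a back-to-front next-non-whitespace table, and then reconstructs each page's (start,end) range purely arithmetically from the counts, the global match list and that table.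
import Mathlib
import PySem

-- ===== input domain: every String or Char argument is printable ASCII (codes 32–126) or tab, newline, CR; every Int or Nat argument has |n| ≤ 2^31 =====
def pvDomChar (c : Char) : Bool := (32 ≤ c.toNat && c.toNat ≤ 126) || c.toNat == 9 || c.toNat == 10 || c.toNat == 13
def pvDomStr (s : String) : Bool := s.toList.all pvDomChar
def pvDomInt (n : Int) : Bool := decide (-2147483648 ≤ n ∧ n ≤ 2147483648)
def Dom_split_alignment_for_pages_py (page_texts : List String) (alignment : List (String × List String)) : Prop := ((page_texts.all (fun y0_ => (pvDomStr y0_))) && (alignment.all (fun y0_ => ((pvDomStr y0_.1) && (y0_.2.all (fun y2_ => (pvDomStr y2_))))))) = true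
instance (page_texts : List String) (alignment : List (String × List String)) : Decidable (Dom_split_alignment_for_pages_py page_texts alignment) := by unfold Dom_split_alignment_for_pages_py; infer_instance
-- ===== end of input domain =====

-- B replaces A's per-page two-pointer scan by a staged pipeline: flatten pages into one lowered
-- non-whitespace token stream (keeping per-page counts), one merge scan over the alignment chars
-- producing the global match-index list, a back-to-front next-non-whitespace table, and a purely
-- arithmetic per-page reconstruction of the ranges (objective: alternative; same asymptotic cost).

-- ===== PORT A =====

-- "not s.strip()" for a 1-char string tch of page_text
def pvWsC (c : Char) : Bool := PySem.Chars.strip [c] == []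
-- "not s.strip()" for an alignment char string (may be empty/multi-char)
def pvWsS (l : List Char) : Bool := PySem.Chars.strip l == []
-- "tch.lower() == ach.lower()"
def pvCI (c : Char) (a : List Char) : Bool := PySem.Chars.lower [c] == PySem.Chars.lower a

-- "while al_idx < n and not chars[al_idx].strip(): al_idx += 1"
-- (fuel only makes the loop total: chars.length steps always suffice, see aSkipF_eq below)
def aSkipF : Nat → List (List Char) → Nat → Nat
  | 0, _, i => i
  | fuel + 1, chars, i =>
    if i < chars.length then
      if pvWsS (chars.getD i []) then aSkipF fuel chars (i + 1) else i
    else i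

-- the inner "while al_idx < n and ti < len(page_text)" loop; returns (al_idx, last_match)
-- (fuel only makes the loop total: chars.length + txt.length steps always suffice)
def aInnerF : Nat → List (List Char) → List Char → Nat → Nat → Int → Nat × Int
  | 0, _, _, i, _, lm => (i, lm)
  | fuel + 1, chars, txt, i, ti, lm =>
    if i < chars.length ∧ ti < txt.length then
      if pvWsC (txt.getD ti ' ') then aInnerF fuel chars txt i (ti + 1) lm
      else if pvWsS (chars.getD i []) then aInnerF fuel chars txt (i + 1) ti lm
      else if ([txt.getD ti ' '] == chars.getD i []) || pvCI (txt.getD ti ' ') (chars.getD i []) then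
        aInnerF fuel chars txt (i + 1) (ti + 1) (i : Int)
      else aInnerF fuel chars txt (i + 1) ti lm
    else (i, lm)

-- "for page_text in page_texts" loop of A
def aPages (chars : List (List Char)) (i : Nat) : List String → List (Int × Int)
  | [] => []
  | p :: rest =>
    let s := aSkipF chars.length chars i
    let r := aInnerF (chars.length + p.toList.length) chars p.toList s 0 ((s : Int) - 1)
    ((s : Int), if r.2 ≥ (s : Int) then r.2 + 1 else (s : Int)) :: aPages chars r.1 rest

-- chars = alignment.get('characters') or []  (assoc-list dict: first match; empty list is falsy and
-- yields [] either way); strings are taken to their char lists once, exact since A only compares them whole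
def split_alignment_for_pages_py (page_texts : List String) (alignment : List (String × List String)) : List (Int × Int) :=
  aPages (((alignment.lookup "characters").getD []).map String.toList) 0 page_texts

-- ===== PORT B =====

-- stage 1 body for one page: its non-whitespace chars, lowered (toks appended per page; count = length)
def bToksOf (txt : List Char) : List (List Char) :=
  (txt.filter (fun c => !pvWsC c)).map (fun c => PySem.Chars.lower [c])

-- stage 2: "for i, ac in enumerate(chars): if t >= len(toks): break; …" — the remaining tokens
-- play the role of the pointer t; i is the enumerate counter
def bMerge (chars : List (List Char)) (i : Nat) (toks : List (List Char)) : List Nat :=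
  match chars, toks with
  | _, [] => []                                  -- break: t >= len(toks)
  | [], _ => []
  | ac :: rest, t :: ts =>
    if pvWsS ac then bMerge rest (i + 1) (t :: ts)
    else if PySem.Chars.lower ac == t then i :: bMerge rest (i + 1) ts
    else bMerge rest (i + 1) (t :: ts)

-- stage 3: the back-to-front fill "nxt[i] = i if chars[i].strip() else nxt[i+1]" rendered as
-- right-recursion building the same length-(n+1) array (entry n is the sentinel n)
def bNxt (nn : Nat) : List (List Char) → Nat → List Nat
  | [], _ => [nn]
  | c :: rest, i =>
    let tl := bNxt nn rest (i + 1)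
    (if pvWsS c then tl.headD nn else i) :: tl

-- stage 4: "for cnt in counts" reconstruction; cur and pos as in Source B (indices are in range, so
-- getD is exact for the Python list indexing)
def bRanges (nn : Nat) (nxt : List Nat) (mi : List Nat) : List Nat → Nat → Nat → List (Int × Int)
  | [], _, _ => []
  | cnt :: cs, cur, pos =>
    let start := nxt.getD cur nn
    let hi := pos + cnt
    let mhi := min hi mi.length
    let last := mi.getD (mhi - 1) 0
    ((start : Int), if pos < mhi then (last : Int) + 1 else (start : Int)) ::
      bRanges nn nxt mi cs (if mi.length < hi then nn else if pos < mhi then last + 1 else start) hi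

def split_alignment_for_pages_py_alt (page_texts : List String) (alignment : List (String × List String)) : List (Int × Int) :=
  let chars := ((alignment.lookup "characters").getD []).map String.toList
  let toks := page_texts.flatMap (fun p => bToksOf p.toList)
  let counts := page_texts.map (fun p => (bToksOf p.toList).length)
  bRanges chars.length (bNxt chars.length chars 0) (bMerge chars 0 toks) counts 0 0

-- ===== PRECONDITION & SPEC =====
def Spec_split_alignment_for_pages_py (page_texts : List String) (alignment : List (String × List String)) (out : List (Int × Int)) : Prop := out = split_alignment_for_pages_py_alt page_texts alignment
instance (page_texts : List String) (alignment : List (String × List String)) (out : List (Int × Int)) : Decidable (Spec_split_alignment_for_pages_py page_texts alignment out) := by unfold Spec_split_alignment_for_pages_py; infer_instance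

-- ===== CLAIM (what is proved, stated in full; the proofs are below) =====
def Claim_equal_split_alignment_for_pages_py : Prop := ∀ (page_texts : List String) (alignment : List (String × List String)), Dom_split_alignment_for_pages_py page_texts alignment → Spec_split_alignment_for_pages_py page_texts alignment (split_alignment_for_pages_py page_texts alignment)

-- ===== LEMMAS AND PROOFS =====

-- ---- proof-side views of A's two while loops (index-based, well-founded) ----

def aSkip (chars : List (List Char)) (i : Nat) : Nat :=
  if h : i < chars.length then
    if pvWsS chars[i] then aSkip chars (i + 1) else i
  else i
termination_by chars.length - i

def aInner (chars : List (List Char)) (txt : List Char) (i ti : Nat) (lm : Int) : Nat × Int :=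
  if h : i < chars.length ∧ ti < txt.length then
    if pvWsC txt[ti] then aInner chars txt i (ti + 1) lm
    else if pvWsS chars[i] then aInner chars txt (i + 1) ti lm
    else if ([txt[ti]] == chars[i]) || pvCI txt[ti] chars[i] then
      aInner chars txt (i + 1) (ti + 1) (i : Int)
    else aInner chars txt (i + 1) ti lm
  else (i, lm)
termination_by (chars.length - i) + (txt.length - ti)

theorem aSkipF_eq (chars : List (List Char)) (fuel i : Nat) (h : chars.length - i ≤ fuel) :
    aSkipF fuel chars i = aSkip chars i := by
  induction fuel generalizing i with
  | zero =>
    unfold aSkip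
    rw [dif_neg (by omega)]
    rfl
  | succ f ih =>
    unfold aSkip
    simp only [aSkipF]
    by_cases hi : i < chars.length
    · rw [if_pos hi, dif_pos hi, List.getD_eq_getElem _ _ hi]
      by_cases hw : pvWsS chars[i] = true
      · rw [if_pos hw, if_pos hw, ih (i + 1) (by omega)]
      · rw [if_neg hw, if_neg hw]
    · rw [if_neg hi, dif_neg hi]

theorem aInnerF_eq (chars : List (List Char)) (txt : List Char) (fuel i ti : Nat) (lm : Int)
    (h : (chars.length - i) + (txt.length - ti) ≤ fuel) :
    aInnerF fuel chars txt i ti lm = aInner chars txt i ti lm := by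
  induction fuel generalizing i ti lm with
  | zero =>
    unfold aInner
    rw [dif_neg (by omega)]
    rfl
  | succ f ih =>
    unfold aInner
    simp only [aInnerF]
    by_cases hc : i < chars.length ∧ ti < txt.length
    · rw [if_pos hc, dif_pos hc]
      obtain ⟨hi, hti⟩ := hc
      rw [List.getD_eq_getElem _ _ hi, List.getD_eq_getElem _ _ hti]
      by_cases hwt : pvWsC txt[ti] = true
      · rw [if_pos hwt, if_pos hwt, ih i (ti + 1) lm (by omega)]
      · rw [if_neg hwt, if_neg hwt]
        by_cases hwa : pvWsS chars[i] = true
        · rw [if_pos hwa, if_pos hwa, ih (i + 1) ti lm (by omega)]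
        · rw [if_neg hwa, if_neg hwa]
          by_cases hm : (([txt[ti]] == chars[i]) || pvCI txt[ti] chars[i]) = true
          · rw [if_pos hm, if_pos hm, ih (i + 1) (ti + 1) (i : Int) (by omega)]
          · rw [if_neg hm, if_neg hm, ih (i + 1) ti lm (by omega)]
    · rw [if_neg hc, dif_neg hc]

-- ---- proof-side intermediate: A rewritten over the non-whitespace (index, char) table ----

def nzFrom (chars : List (List Char)) (i : Nat) : List (Int × List Char) :=
  if h : i < chars.length then
    if pvWsS chars[i] then nzFrom chars (i + 1)
    else ((i : Int), chars[i]) :: nzFrom chars (i + 1)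
  else []
termination_by chars.length - i

def bSeek (c : Char) : List (Int × List Char) → List (Int × List Char)
  | [] => []
  | (j, a) :: r => if pvCI c a then (j, a) :: r else bSeek c r

def bPage : List Char → List (Int × List Char) → Int → Int × List (Int × List Char)
  | [], rest, lm => (lm, rest)
  | c :: tl, rest, lm =>
    if pvWsC c then bPage tl rest lm
    else
      match bSeek c rest with
      | [] => (lm, [])
      | (j, _) :: r2 => bPage tl r2 j

def bPages (n : Int) : List String → List (Int × List Char) → List (Int × Int)
  | [], _ => []
  | p :: ps, rest =>
    let s : Int := match rest with | [] => n | (j, _) :: _ => j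
    let r := bPage p.toList rest (s - 1)
    (s, if r.1 ≥ s then r.1 + 1 else s) :: bPages n ps r.2

theorem nzFrom_of_ge (chars : List (List Char)) (i : Nat) (h : chars.length ≤ i) :
    nzFrom chars i = [] := by
  unfold nzFrom; rw [dif_neg (by omega)]

theorem aSkip_le (chars : List (List Char)) (i : Nat) (h : i ≤ chars.length) :
    aSkip chars i ≤ chars.length := by
  unfold aSkip
  by_cases hi : i < chars.length
  · rw [dif_pos hi]
    by_cases hw : pvWsS chars[i] = true
    · rw [if_pos hw]; exact aSkip_le chars (i + 1) (by omega)
    · rw [if_neg hw]; omega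
  · rw [dif_neg hi]; omega
termination_by chars.length - i

theorem aSkip_ge (chars : List (List Char)) (i : Nat) : i ≤ aSkip chars i := by
  unfold aSkip
  by_cases hi : i < chars.length
  · rw [dif_pos hi]
    by_cases hw : pvWsS chars[i] = true
    · rw [if_pos hw]; have := aSkip_ge chars (i + 1); omega
    · rw [if_neg hw]
  · rw [dif_neg hi]
termination_by chars.length - i

theorem nzFrom_aSkip (chars : List (List Char)) (i : Nat) :
    nzFrom chars (aSkip chars i) = nzFrom chars i := by
  unfold aSkip
  by_cases hi : i < chars.length
  · rw [dif_pos hi]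
    by_cases hw : pvWsS chars[i] = true
    · rw [if_pos hw, nzFrom_aSkip chars (i + 1)]
      conv_rhs => unfold nzFrom
      rw [dif_pos hi, if_pos hw]
    · rw [if_neg hw]
  · rw [dif_neg hi]
termination_by chars.length - i

theorem aSkip_eq_head (chars : List (List Char)) (i : Nat) (h : i ≤ chars.length) :
    (aSkip chars i : Int) =
      (match nzFrom chars i with | [] => (chars.length : Int) | (j, _) :: _ => j) := by
  unfold aSkip nzFrom
  by_cases hi : i < chars.length
  · rw [dif_pos hi, dif_pos hi]
    by_cases hw : pvWsS chars[i] = true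
    · rw [if_pos hw, if_pos hw]; exact aSkip_eq_head chars (i + 1) (by omega)
    · rw [if_neg hw, if_neg hw]
  · rw [dif_neg hi, dif_neg hi]
    show (i : Int) = (chars.length : Int)
    omega
termination_by chars.length - i

theorem aMatch_eq (c : Char) (a : List Char) :
    (([c] == a) || pvCI c a) = pvCI c a := by
  by_cases h : ([c] == a) = true
  · have : a = [c] := (beq_iff_eq.mp h).symm
    subst this; simp [pvCI]
  · simp [h]

theorem bPage_nil (txt : List Char) (lm : Int) : bPage txt [] lm = (lm, []) := by
  induction txt with
  | nil => rfl
  | cons c tl ih => by_cases hw : pvWsC c = true <;> simp [bPage, hw, bSeek, ih]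

theorem inner_eq (chars : List (List Char)) (txt : List Char) (i ti : Nat) (lm : Int)
    (h : i ≤ chars.length) :
    (aInner chars txt i ti lm).2 = (bPage (txt.drop ti) (nzFrom chars i) lm).1 ∧
    nzFrom chars (aInner chars txt i ti lm).1 = (bPage (txt.drop ti) (nzFrom chars i) lm).2 ∧
    (aInner chars txt i ti lm).1 ≤ chars.length := by
  unfold aInner
  by_cases hc : i < chars.length ∧ ti < txt.length
  · rw [dif_pos hc]
    obtain ⟨hi, hti⟩ := hc
    rw [List.drop_eq_getElem_cons hti]
    by_cases hwt : pvWsC txt[ti] = true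
    · rw [if_pos hwt]
      have ih := inner_eq chars txt i (ti + 1) lm h
      simpa [bPage, hwt] using ih
    · rw [if_neg hwt]
      by_cases hwa : pvWsS chars[i] = true
      · rw [if_pos hwa]
        have ih := inner_eq chars txt (i + 1) ti lm (by omega)
        rw [List.drop_eq_getElem_cons hti] at ih
        have hnz : nzFrom chars i = nzFrom chars (i + 1) := by
          conv_lhs => unfold nzFrom
          rw [dif_pos hi, if_pos hwa]
        rw [hnz]; exact ih
      · have hnz : nzFrom chars i = ((i : Int), chars[i]) :: nzFrom chars (i + 1) := by
          conv_lhs => unfold nzFrom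
          rw [dif_pos hi, if_neg hwa]
        rw [if_neg hwa, aMatch_eq, hnz]
        by_cases hm : pvCI txt[ti] chars[i] = true
        · rw [if_pos hm]
          have ih := inner_eq chars txt (i + 1) (ti + 1) (i : Int) (by omega)
          simpa [bPage, hwt, bSeek, hm] using ih
        · rw [if_neg hm]
          have ih := inner_eq chars txt (i + 1) ti lm (by omega)
          rw [List.drop_eq_getElem_cons hti] at ih
          simpa [bPage, hwt, bSeek, hm] using ih
  · rw [dif_neg hc]
    rcases Nat.lt_or_ge ti txt.length with hti | hti
    · have hi : chars.length ≤ i := by omega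
      have : i = chars.length := by omega
      rw [nzFrom_of_ge chars i hi, bPage_nil]
      exact ⟨rfl, rfl, h⟩
    · rw [List.drop_eq_nil_of_le hti]
      exact ⟨rfl, rfl, h⟩
termination_by (chars.length - i) + (txt.length - ti)

theorem pages_eq (chars : List (List Char)) (pts : List String) (i : Nat) (h : i ≤ chars.length) :
    aPages chars i pts = bPages (chars.length : Int) pts (nzFrom chars i) := by
  induction pts generalizing i with
  | nil => rfl
  | cons p ps ih =>
    simp only [aPages, bPages]
    rw [aSkipF_eq chars chars.length i (by omega),
      aInnerF_eq chars p.toList (chars.length + p.toList.length) (aSkip chars i) 0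
        ((aSkip chars i : Int) - 1) (by omega)]
    have hs := aSkip_eq_head chars i h
    have hsk := nzFrom_aSkip chars i
    have hle := aSkip_le chars i h
    have hin := inner_eq chars p.toList (aSkip chars i) 0 ((aSkip chars i : Int) - 1) hle
    rw [hsk] at hin
    simp only [List.drop_zero] at hin
    obtain ⟨h1, h2, h3⟩ := hin
    rw [hs] at h1 h2 h3 ⊢
    rw [h1, ih _ h3, h2]

-- ---- stage-2 view: matching the raw filtered token stream against the table ----

def mseq : List Char → List (Int × List Char) → List Nat × List (Int × List Char)
  | [], nz => ([], nz)
  | c :: ts, nz =>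
    match bSeek c nz with
    | [] => ([], [])
    | (j, _) :: r => let p := mseq ts r; (j.toNat :: p.1, p.2)

theorem mseq_nil_nz (ts : List Char) : mseq ts [] = ([], []) := by
  cases ts <;> simp [mseq, bSeek]

theorem mseq_append (a b : List Char) (nz : List (Int × List Char)) :
    mseq (a ++ b) nz =
      ((mseq a nz).1 ++ (mseq b (mseq a nz).2).1, (mseq b (mseq a nz).2).2) := by
  induction a generalizing nz with
  | nil => simp [mseq]
  | cons c a' ih =>
    simp only [List.cons_append, mseq]
    cases hs : bSeek c nz with
    | nil => simp [mseq_nil_nz]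
    | cons p r => cases p with | mk j x => simp [ih]

theorem seek_spec (chars : List (List Char)) (tc : Char) (c : Nat) (h : c ≤ chars.length) :
    bSeek tc (nzFrom chars c) = [] ∨
      ∃ jn : Nat, jn < chars.length ∧ aSkip chars c ≤ jn ∧
        bSeek tc (nzFrom chars c) = ((jn : Int), chars.getD jn []) :: nzFrom chars (jn + 1) := by
  by_cases hi : c < chars.length
  · by_cases hw : pvWsS chars[c] = true
    · have hnz : nzFrom chars c = nzFrom chars (c + 1) := by
        conv_lhs => unfold nzFrom
        rw [dif_pos hi, if_pos hw]
      have hsk : aSkip chars c = aSkip chars (c + 1) := by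
        conv_lhs => unfold aSkip
        rw [dif_pos hi, if_pos hw]
      rw [hnz, hsk]
      exact seek_spec chars tc (c + 1) (by omega)
    · have hnz : nzFrom chars c = ((c : Int), chars[c]) :: nzFrom chars (c + 1) := by
        conv_lhs => unfold nzFrom
        rw [dif_pos hi, if_neg hw]
      have hsk : aSkip chars c = c := by
        conv_lhs => unfold aSkip
        rw [dif_pos hi, if_neg hw]
      rw [hnz]
      by_cases hm : pvCI tc chars[c] = true
      · right
        refine ⟨c, hi, by omega, ?_⟩
        simp [bSeek, hm, List.getD, hi]
      · have : bSeek tc (((c : Int), chars[c]) :: nzFrom chars (c + 1)) =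
            bSeek tc (nzFrom chars (c + 1)) := by simp [bSeek, hm]
        rw [this]
        rcases seek_spec chars tc (c + 1) (by omega) with h0 | ⟨jn, h1, h2, h3⟩
        · exact Or.inl h0
        · right
          have := aSkip_ge chars (c + 1)
          exact ⟨jn, h1, by omega, h3⟩
  · rw [nzFrom_of_ge chars c (by omega)]
    exact Or.inl rfl
termination_by chars.length - c

theorem lastI_ne (ms : List Nat) (lm : Int) (h : ms ≠ []) :
    ms.foldl (fun (_ : Int) (j : Nat) => (j : Int)) lm = ((ms.getLastD 0 : Nat) : Int) := by
  induction ms generalizing lm with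
  | nil => exact absurd rfl h
  | cons x xs ih =>
    cases xs with
    | nil => simp [List.foldl]
    | cons y ys => simpa using ih (x : Int) (List.cons_ne_nil _ _)

theorem mseq_length_le (ts : List Char) (nz : List (Int × List Char)) :
    (mseq ts nz).1.length ≤ ts.length := by
  induction ts generalizing nz with
  | nil => simp [mseq]
  | cons c ts' ih =>
    simp only [mseq]
    cases hs : bSeek c nz with
    | nil => simp
    | cons p r =>
      cases p with
      | mk j x =>
        have := ih r
        simpa using Nat.succ_le_succ this

theorem getLastD_mem (ms : List Nat) (h : ms ≠ []) : ms.getLastD 0 ∈ ms := by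
  cases ms with
  | nil => exact absurd rfl h
  | cons x xs =>
    have : (x :: xs).getLastD 0 = (x :: xs).getLast (List.cons_ne_nil _ _) := by
      simp [List.getLastD_eq_getLast?, List.getLast?_eq_some_getLast]
    rw [this]
    exact List.getLast_mem _

-- the per-page correspondence: bPage over the table = stage-2 matching of the filtered tokens
theorem page_spec (chars : List (List Char)) (ts : List Char) (c : Nat) (lm : Int)
    (h : c ≤ chars.length) :
    ∃ c', c' ≤ chars.length ∧
      (mseq (ts.filter (fun x => !pvWsC x)) (nzFrom chars c)).2 = nzFrom chars c' ∧
      bPage ts (nzFrom chars c) lm =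
        (((mseq (ts.filter (fun x => !pvWsC x)) (nzFrom chars c)).1).foldl
            (fun (_ : Int) (j : Nat) => (j : Int)) lm, nzFrom chars c') ∧
      (∀ x ∈ (mseq (ts.filter (fun x => !pvWsC x)) (nzFrom chars c)).1,
          aSkip chars c ≤ x ∧ x < chars.length) ∧
      ((mseq (ts.filter (fun x => !pvWsC x)) (nzFrom chars c)).1.length <
          (ts.filter (fun x => !pvWsC x)).length → c' = chars.length) ∧
      ((ts.filter (fun x => !pvWsC x)) = [] → c' = c) ∧
      ((mseq (ts.filter (fun x => !pvWsC x)) (nzFrom chars c)).1 ≠ [] →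
        (mseq (ts.filter (fun x => !pvWsC x)) (nzFrom chars c)).1.length =
          (ts.filter (fun x => !pvWsC x)).length →
        c' = (mseq (ts.filter (fun x => !pvWsC x)) (nzFrom chars c)).1.getLastD 0 + 1) := by
  induction ts generalizing c lm with
  | nil =>
    exact ⟨c, h, rfl, rfl, by simp [mseq], by simp [mseq], fun _ => rfl, by simp [mseq]⟩
  | cons t tl ih =>
    by_cases hw : pvWsC t = true
    · simpa [List.filter_cons, hw, bPage] using ih c lm h
    · have hwf : pvWsC t = false := by simpa using hw
      have hfil : (t :: tl).filter (fun x => !pvWsC x) = t :: tl.filter (fun x => !pvWsC x) := by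
        simp [hwf]
      rw [hfil]
      rcases seek_spec chars t c h with hs | ⟨jn, hjn, hsk, hs⟩
      · refine ⟨chars.length, le_refl _, ?_⟩
        rw [nzFrom_of_ge chars chars.length (le_refl _)]
        simp [mseq, bPage, hs, hwf]
      · obtain ⟨c'', hc1, hc2, hc3, hc4, hc5, hc6, hc7⟩ := ih (jn + 1) (jn : Int) (by omega)
        refine ⟨c'', hc1, ?_, ?_, ?_, ?_, ?_, ?_⟩
        · simp [mseq, hs, hc2]
        · simp only [bPage, hw, Bool.false_eq_true, if_false, hs, mseq, hc3, List.foldl_cons,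
            Int.toNat_natCast]
        · intro x hx
          simp only [mseq, hs] at hx
          rcases List.mem_cons.mp hx with rfl | hx
          · have := aSkip_le chars c h
            constructor <;> omega
          · have h1 := (hc4 x hx).1
            have h2 := (hc4 x hx).2
            have := aSkip_ge chars (jn + 1)
            constructor <;> omega
        · intro hlen
          simp only [mseq, hs, List.length_cons] at hlen
          exact hc5 (by omega)
        · intro habs; exact absurd habs (List.cons_ne_nil _ _)
        · intro hne hlen
          simp only [mseq, hs, List.length_cons] at hlen ⊢
          cases hp : (mseq (tl.filter (fun x => !pvWsC x)) (nzFrom chars (jn + 1))).1 with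
          | nil =>
            have hf : tl.filter (fun x => !pvWsC x) = [] := by
              have h0 := congrArg List.length hp
              simp only [List.length_nil] at h0
              exact List.eq_nil_of_length_eq_zero (by omega)
            simp [List.getLastD, hc6 hf]
          | cons y ys =>
            have := hc7 (by simp [hp]) (by omega)
            rw [hp] at this
            simpa [List.getLastD] using this

-- bMerge over lowered tokens = stage-2 matching over the table
theorem merge_eq_mseq (chars : List (List Char)) (ts : List Char) (c : Nat)
    (h : c ≤ chars.length) :
    bMerge (chars.drop c) c (ts.map (fun x => PySem.Chars.lower [x])) =
      (mseq ts (nzFrom chars c)).1 := by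
  by_cases hi : c < chars.length
  · cases ts with
    | nil => simp [bMerge, mseq]
    | cons t ts' =>
      rw [List.drop_eq_getElem_cons hi]
      by_cases hw : pvWsS chars[c] = true
      · have hnz : nzFrom chars c = nzFrom chars (c + 1) := by
          conv_lhs => unfold nzFrom
          rw [dif_pos hi, if_pos hw]
        simp only [List.map_cons, bMerge, hw, if_pos, hnz]
        exact merge_eq_mseq chars (t :: ts') (c + 1) (by omega)
      · have hnz : nzFrom chars c = ((c : Int), chars[c]) :: nzFrom chars (c + 1) := by
          conv_lhs => unfold nzFrom
          rw [dif_pos hi, if_neg hw]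
        by_cases hm : pvCI t chars[c] = true
        · have hm' : (PySem.Chars.lower chars[c] == PySem.Chars.lower [t]) = true := by
            have heq : PySem.Chars.lower [t] = PySem.Chars.lower chars[c] := by
              simpa [pvCI] using hm
            simp [heq]
          simp only [List.map_cons, bMerge, hw, Bool.false_eq_true, if_false, hm', if_pos,
            hnz, mseq, bSeek, hm, Int.toNat_natCast]
          exact congrArg (c :: ·) (merge_eq_mseq chars ts' (c + 1) (by omega))
        · have hm' : (PySem.Chars.lower chars[c] == PySem.Chars.lower [t]) = false := by
            have : ¬ PySem.Chars.lower [t] = PySem.Chars.lower chars[c] := by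
              simpa [pvCI] using hm
            simpa using fun hq => this hq.symm
          have hms : mseq (t :: ts') (nzFrom chars c) = mseq (t :: ts') (nzFrom chars (c + 1)) := by
            simp [mseq, hnz, bSeek, hm]
          simp only [List.map_cons, bMerge, hw, Bool.false_eq_true, if_false, hm', hms]
          exact merge_eq_mseq chars (t :: ts') (c + 1) (by omega)
  · rw [List.drop_eq_nil_of_le (by omega), nzFrom_of_ge chars c (by omega)]
    cases ts <;> simp [bMerge, mseq, bSeek]
termination_by (chars.length - c) + ts.length

theorem headD_eq_getD0 {α : Type} (l : List α) (d : α) : l.headD d = l.getD 0 d := by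
  cases l <;> rfl

theorem bNxt_getD (chars : List (List Char)) (i k : Nat) (h : i + k ≤ chars.length) :
    (bNxt chars.length (chars.drop i) i).getD k chars.length = aSkip chars (i + k) := by
  by_cases hi : i < chars.length
  · rw [List.drop_eq_getElem_cons hi]
    cases k with
    | zero =>
      simp only [bNxt, List.getD_cons_zero, Nat.add_zero]
      by_cases hw : pvWsS chars[i] = true
      · rw [if_pos hw, headD_eq_getD0]
        have := bNxt_getD chars (i + 1) 0 (by omega)
        rw [this]
        conv_rhs => unfold aSkip
        rw [dif_pos hi, if_pos hw]
      · rw [if_neg hw]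
        conv_rhs => unfold aSkip
        rw [dif_pos hi, if_neg hw]
    | succ k' =>
      simp only [bNxt, List.getD_cons_succ]
      have := bNxt_getD chars (i + 1) k' (by omega)
      rw [this, show i + (k' + 1) = i + 1 + k' by omega]
  · have hik : i = chars.length ∧ k = 0 := by omega
    obtain ⟨rfl, rfl⟩ := hik
    rw [List.drop_eq_nil_of_le (by omega)]
    conv_rhs => unfold aSkip
    rw [dif_neg (by omega)]
    rfl
termination_by chars.length - i

-- the nxt table reads off the first non-whitespace index
theorem nxt_getD (chars : List (List Char)) (cur : Nat) (h : cur ≤ chars.length) :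
    (bNxt chars.length chars 0).getD cur chars.length = aSkip chars cur := by
  have h0 := bNxt_getD chars 0 cur (by omega)
  simpa using h0

-- the global reconstruction
theorem ranges_eq (chars : List (List Char)) (mi : List Nat) (ps : List String)
    (cur pos : Nat) (hc : cur ≤ chars.length)
    (hmi : mi.drop pos = (mseq ((ps.flatMap (fun p => p.toList.filter (fun x => !pvWsC x))))
      (nzFrom chars cur)).1)
    (hex : mi.length < pos → nzFrom chars cur = []) :
    bPages (chars.length : Int) ps (nzFrom chars cur) =
      bRanges chars.length (bNxt chars.length chars 0) mi
        (ps.map (fun p => (p.toList.filter (fun x => !pvWsC x)).length)) cur pos := by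
  induction ps generalizing cur pos with
  | nil => rfl
  | cons p ps' ih =>
    obtain ⟨c', hle, hP2, hPb, hPmem, hPex, hPnil, hPlast⟩ :=
      page_spec chars p.toList cur ((aSkip chars cur : Int) - 1) hc
    rw [List.flatMap_cons, mseq_append] at hmi
    simp only at hmi
    rw [hP2] at hmi
    simp only [bPages, bRanges, List.map_cons]
    rw [← aSkip_eq_head chars cur hc, hPb, nxt_getD chars cur hc]
    dsimp only
    by_cases hpos : mi.length < pos
    · -- alignment already exhausted before this page
      have hnz0 : nzFrom chars cur = [] := hex hpos
      have hsk : aSkip chars cur = chars.length := by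
        have h2 : (aSkip chars cur : Int) = (chars.length : Int) := by
          rw [aSkip_eq_head chars cur hc, hnz0]
        omega
      have hms0 : mseq (List.filter (fun x => !pvWsC x) p.toList) (nzFrom chars cur) = ([], []) := by
        rw [hnz0, mseq_nil_nz]
      have hc'0 : nzFrom chars c' = [] := by rw [← hP2, hms0]
      rw [hms0]
      have hdrop : mi.drop (pos + (List.filter (fun x => !pvWsC x) p.toList).length) = [] :=
        List.drop_eq_nil_of_le (by omega)
      have htail := ih chars.length (pos + (List.filter (fun x => !pvWsC x) p.toList).length)
        (le_refl _)
        (by rw [hdrop, nzFrom_of_ge chars chars.length (le_refl _), mseq_nil_nz])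
        (fun _ => nzFrom_of_ge chars chars.length (le_refl _))
      rw [nzFrom_of_ge chars chars.length (le_refl _)] at htail
      rw [hc'0, htail]
      have h1 : ¬ ((↑(aSkip chars cur) - 1 : Int) ≥ (↑(aSkip chars cur) : Int)) := by omega
      have h2 : ¬ pos < min (pos + (List.filter (fun x => !pvWsC x) p.toList).length) mi.length := by
        omega
      have h3 : mi.length < pos + (List.filter (fun x => !pvWsC x) p.toList).length := by omega
      simp only [List.foldl_nil, if_neg h2, if_pos h3, hsk]
      rw [if_neg (show ¬ ((chars.length : Int) - 1 ≥ (chars.length : Int)) by omega)]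
    · have hposle : pos ≤ mi.length := by omega
      have hqle := mseq_length_le (List.filter (fun x => !pvWsC x) p.toList) (nzFrom chars cur)
      have hlendrop := congrArg List.length hmi
      simp only [List.length_drop, List.length_append] at hlendrop
      by_cases hqc : (mseq (List.filter (fun x => !pvWsC x) p.toList) (nzFrom chars cur)).1.length <
          (List.filter (fun x => !pvWsC x) p.toList).length
      · -- alignment becomes exhausted during (or right before the end of) this page
        have hc'len : c' = chars.length := hPex hqc
        have hmsR0 : (mseq (List.flatMap (fun p => List.filter (fun x => !pvWsC x) p.toList) ps')
            (nzFrom chars c')).1 = [] := by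
          rw [hc'len, nzFrom_of_ge chars chars.length (le_refl _), mseq_nil_nz]
        rw [hmsR0, List.append_nil] at hmi
        have hf0 : (mseq (List.flatMap (fun p => List.filter (fun x => !pvWsC x) p.toList) ps')
            (nzFrom chars c')).1.length = 0 := by rw [hmsR0]; rfl
        have hM : mi.length = pos +
            (mseq (List.filter (fun x => !pvWsC x) p.toList) (nzFrom chars cur)).1.length := by
          omega
        have hdrop : mi.drop (pos + (List.filter (fun x => !pvWsC x) p.toList).length) = [] :=
          List.drop_eq_nil_of_le (by omega)
        have htail := ih chars.length (pos + (List.filter (fun x => !pvWsC x) p.toList).length)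
          (le_refl _)
          (by rw [hdrop, nzFrom_of_ge chars chars.length (le_refl _), mseq_nil_nz])
          (fun _ => nzFrom_of_ge chars chars.length (le_refl _))
        rw [hc'len] at hP2 ⊢
        rw [htail]
        have h3 : mi.length < pos + (List.filter (fun x => !pvWsC x) p.toList).length := by omega
        rw [if_pos h3]
        by_cases hq : (mseq (List.filter (fun x => !pvWsC x) p.toList) (nzFrom chars cur)).1 = []
        · have h1 : ¬ ((↑(aSkip chars cur) - 1 : Int) ≥ (↑(aSkip chars cur) : Int)) := by omega
          have h2 : ¬ pos < min (pos + (List.filter (fun x => !pvWsC x) p.toList).length)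
              mi.length := by
            have := congrArg List.length hq
            simp only [List.length_nil] at this
            omega
          rw [hq]
          simp only [List.foldl_nil, if_neg h1, if_neg h2]
        · have hmhi : min (pos + (List.filter (fun x => !pvWsC x) p.toList).length) mi.length =
              pos + (mseq (List.filter (fun x => !pvWsC x) p.toList) (nzFrom chars cur)).1.length := by
            omega
          have hqpos : 0 <
              (mseq (List.filter (fun x => !pvWsC x) p.toList) (nzFrom chars cur)).1.length :=
            List.length_pos_of_ne_nil hq
          have hlastD : mi.getD (pos +
              (mseq (List.filter (fun x => !pvWsC x) p.toList) (nzFrom chars cur)).1.length - 1) 0 =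
              (mseq (List.filter (fun x => !pvWsC x) p.toList) (nzFrom chars cur)).1.getLastD 0 := by
            have e1 : pos +
                (mseq (List.filter (fun x => !pvWsC x) p.toList) (nzFrom chars cur)).1.length - 1 =
                pos + ((mseq (List.filter (fun x => !pvWsC x) p.toList) (nzFrom chars cur)).1.length
                  - 1) := by omega
            rw [e1]
            simp only [List.getD]
            rw [← List.getElem?_drop, hmi]
            rw [List.getLastD_eq_getLast?, List.getLast?_eq_getElem?]
          have hmem := getLastD_mem _ hq
          have hskle := (hPmem _ hmem).1
          rw [lastI_ne _ _ hq]
          rw [if_pos (show ((mseq (List.filter (fun x => !pvWsC x) p.toList)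
              (nzFrom chars cur)).1.getLastD 0 : Int) ≥ (aSkip chars cur : Int) by
            exact_mod_cast hskle)]
          rw [hmhi]
          rw [if_pos (show pos < pos + (mseq (List.filter (fun x => !pvWsC x) p.toList)
              (nzFrom chars cur)).1.length by omega)]
          rw [hlastD]
      · -- every token of this page is matched
        have hqeq : (mseq (List.filter (fun x => !pvWsC x) p.toList) (nzFrom chars cur)).1.length =
            (List.filter (fun x => !pvWsC x) p.toList).length := by omega
        have hfit : pos + (List.filter (fun x => !pvWsC x) p.toList).length ≤ mi.length := by omega
        have h3 : ¬ mi.length < pos + (List.filter (fun x => !pvWsC x) p.toList).length := by omega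
        have hmhi : min (pos + (List.filter (fun x => !pvWsC x) p.toList).length) mi.length =
            pos + (mseq (List.filter (fun x => !pvWsC x) p.toList) (nzFrom chars cur)).1.length := by
          omega
        have hdrop2 : mi.drop (pos + (List.filter (fun x => !pvWsC x) p.toList).length) =
            (mseq (List.flatMap (fun p => List.filter (fun x => !pvWsC x) p.toList) ps')
              (nzFrom chars c')).1 := by
          have hdd : (mi.drop pos).drop
              ((mseq (List.filter (fun x => !pvWsC x) p.toList) (nzFrom chars cur)).1.length) =
              mi.drop (pos +
                (mseq (List.filter (fun x => !pvWsC x) p.toList) (nzFrom chars cur)).1.length) := by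
            rw [List.drop_drop, Nat.add_comm]
          rw [← hqeq, ← hdd, hmi, List.drop_left]
        rw [if_neg h3, hmhi]
        by_cases hq : (mseq (List.filter (fun x => !pvWsC x) p.toList) (nzFrom chars cur)).1 = []
        · have hF0 : List.filter (fun x => !pvWsC x) p.toList = [] := by
            have := congrArg List.length hq
            simp only [List.length_nil] at this
            exact List.eq_nil_of_length_eq_zero (by omega)
          have hc'cur : c' = cur := hPnil hF0
          have h1 : ¬ ((↑(aSkip chars cur) - 1 : Int) ≥ (↑(aSkip chars cur) : Int)) := by omega
          rw [hq]
          simp only [List.foldl_nil, List.length_nil, Nat.add_zero, lt_self_iff_false,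
            if_false, if_neg h1]
          have htail := ih (aSkip chars cur) (pos + (List.filter (fun x => !pvWsC x) p.toList).length)
            (aSkip_le chars cur hc)
            (by rw [nzFrom_aSkip, hdrop2, hc'cur])
            (by rw [nzFrom_aSkip]; intro hlt; exact hex (by omega))
          rw [nzFrom_aSkip] at htail
          rw [hc'cur, htail]
        · have hqpos : 0 <
              (mseq (List.filter (fun x => !pvWsC x) p.toList) (nzFrom chars cur)).1.length :=
            List.length_pos_of_ne_nil hq
          have hlastD : mi.getD (pos +
              (mseq (List.filter (fun x => !pvWsC x) p.toList) (nzFrom chars cur)).1.length - 1) 0 =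
              (mseq (List.filter (fun x => !pvWsC x) p.toList) (nzFrom chars cur)).1.getLastD 0 := by
            have e1 : pos +
                (mseq (List.filter (fun x => !pvWsC x) p.toList) (nzFrom chars cur)).1.length - 1 =
                pos + ((mseq (List.filter (fun x => !pvWsC x) p.toList) (nzFrom chars cur)).1.length
                  - 1) := by omega
            rw [e1]
            simp only [List.getD]
            rw [← List.getElem?_drop, hmi]
            rw [List.getElem?_append_left (by omega), List.getLastD_eq_getLast?,
              List.getLast?_eq_getElem?]
          have hmem := getLastD_mem _ hq
          have hskle := (hPmem _ hmem).1
          have hc'last : c' =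
              (mseq (List.filter (fun x => !pvWsC x) p.toList) (nzFrom chars cur)).1.getLastD 0 + 1 :=
            hPlast hq hqeq
          rw [lastI_ne _ _ hq]
          rw [if_pos (show ((mseq (List.filter (fun x => !pvWsC x) p.toList)
              (nzFrom chars cur)).1.getLastD 0 : Int) ≥ (aSkip chars cur : Int) by
            exact_mod_cast hskle)]
          have hplt : pos < pos +
              (mseq (List.filter (fun x => !pvWsC x) p.toList) (nzFrom chars cur)).1.length := by
            omega
          rw [if_pos hplt, if_pos hplt, hlastD]
          have htail := ih c' (pos + (List.filter (fun x => !pvWsC x) p.toList).length)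
            hle hdrop2
            (fun hlt => absurd hlt (by omega))
          rw [htail, hc'last]

-- ===== VERDICT (by name: the statement is the Claim_ definition above) =====
theorem split_alignment_for_pages_py_spec : Claim_equal_split_alignment_for_pages_py := by
  intro page_texts alignment _
  simp only [Spec_split_alignment_for_pages_py, split_alignment_for_pages_py,
    split_alignment_for_pages_py_alt]
  rw [pages_eq _ page_texts 0 (Nat.zero_le _)]
  have htoks : (page_texts.flatMap (fun p => bToksOf p.toList)) =
      (page_texts.flatMap (fun p => p.toList.filter (fun x => !pvWsC x))).map
        (fun x => PySem.Chars.lower [x]) := by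
    simp [bToksOf, List.map_flatMap]
  have hmerge := merge_eq_mseq (((alignment.lookup "characters").getD []).map String.toList)
    (page_texts.flatMap (fun p => p.toList.filter (fun x => !pvWsC x))) 0 (Nat.zero_le _)
  rw [List.drop_zero] at hmerge
  have hcounts : page_texts.map (fun p => (bToksOf p.toList).length) =
      page_texts.map (fun p => (p.toList.filter (fun x => !pvWsC x)).length) := by
    simp [bToksOf]
  rw [htoks, hcounts, hmerge]
  exact ranges_eq (((alignment.lookup "characters").getD []).map String.toList) _ page_texts 0 0
    (Nat.zero_le _) (by rw [List.drop_zero]) (fun h => absurd h (by omega))
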